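-- pv_equiv track=rewrite | github.com/mariahbf/Backtracking | salao.py | validate_standoff
-- ===== SOURCE A (Python) =====
-- DIRECTIONS = [(-1, 0), (1, 0), (0, -1), (0, 1),  # Direções: cima, baixo, esquerda, direita
--               (-1, -1), (-1, 1), (1, -1), (1, 1)]  # Direções diagonais
--
-- def validate_standoff(board):
--     N = len(board)
--     for i in range(N):
--         for j in range(N):
--             if board[i][j] in ('B', 'P'):  # Se há um atirador nessa célula
--                 gang = board[i][j]
--                 enemies_in_sight = count_enemies_in_sight(board, i, j, gang)
--                 if enemies_in_sight == -1 or enemies_in_sight < 2: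
--                     return False
--     return True
--
-- def count_enemies_in_sight(board, i, j, gang):
--     N = len(board)
--     enemy_gang = 'B' if gang == 'P' else 'P'  # Gangue oposta
--     enemies_in_sight = 0
--     for dx, dy in DIRECTIONS:
--         ni, nj = i + dx, j + dy
--         while 0 <= ni < N and 0 <= nj < N:
--             if board[ni][nj] == gang:
--                 return -1  # Atirador da mesma gangue, configuração inválida
--             elif board[ni][nj] == enemy_gang:
--                 enemies_in_sight += 1
--                 break  # Inimigo encontrado, parar de verificar nesta direção
--             ni += dx
--             nj += dy
--     return enemies_in_sight
-- ===== SOURCE B (Python) =====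
-- DIRECTIONS = [(-1, 0), (1, 0), (0, -1), (0, 1),
--               (-1, -1), (-1, 1), (1, -1), (1, 1)]
--
-- def validate_standoff(board):
--     N = len(board)
--     # Sparse approach: collect the shooters once, then for each shooter and
--     # direction find the nearest shooter on that ray by a minimum over the list.
--     shooters = [(i, j, board[i][j])
--                 for i in range(N) for j in range(N)
--                 if board[i][j] in ('B', 'P')]
--     for (i, j, c) in shooters:
--         enemies = 0
--         for (dx, dy) in DIRECTIONS:
--             best = None  # (t, gang) of the nearest shooter on this ray
--             for (x, y, g) in shooters:
--                 t = (x - i) * dx if dx != 0 else (y - j) * dy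
--                 if t > 0 and x - i == t * dx and y - j == t * dy:
--                     if best is None or t < best[0]:
--                         best = (t, g)
--             if best is not None:
--                 if best[1] == c:
--                     return False
--                 enemies += 1
--         if enemies < 2:
--             return False
--     return True
-- ===== Notes on version B (the rewrite author's own statement) =====
-- stated objective: alternative
-- what changed: B collects the shooters into a sparse list once and, for each shooter and direction, finds the nearest shooter on the ray by taking a minimum over that list, instead of A's cell-by-cell walk across the grid in each of the 8 directions.
-- outside the precondition, e.g. on validate_standoff([['B', 'B'], ['x']]): A returns False, B raises IndexError
import Mathlib
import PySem

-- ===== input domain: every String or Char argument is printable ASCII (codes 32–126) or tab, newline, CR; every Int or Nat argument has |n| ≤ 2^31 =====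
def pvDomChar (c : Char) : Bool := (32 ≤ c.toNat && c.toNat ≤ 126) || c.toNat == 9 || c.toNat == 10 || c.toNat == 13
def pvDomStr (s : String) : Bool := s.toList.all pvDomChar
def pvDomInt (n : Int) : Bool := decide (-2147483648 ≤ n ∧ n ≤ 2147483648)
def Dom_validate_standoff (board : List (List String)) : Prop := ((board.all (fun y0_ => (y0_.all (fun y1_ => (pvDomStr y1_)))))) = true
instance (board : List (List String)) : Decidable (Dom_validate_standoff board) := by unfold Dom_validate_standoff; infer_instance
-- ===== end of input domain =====

-- B replaces A's per-shooter grid ray walks by one pass over a sparse shooter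
-- list: for each shooter and direction the nearest shooter on the ray is found by
-- a minimum over the shooter list (alternative algorithm, same measured cost).

-- board[ni][nj], exact whenever both indices are in range (which Pre_ guarantees
-- at every read site); "" is the placeholder for the unreachable IndexError case.
def pvCell (board : List (List String)) (ni nj : Int) : String :=
  (PySem.List.pyGet? ((PySem.List.pyGet? board ni).getD []) nj).getD ""

def pvDIRECTIONS : List (Int × Int) :=
  [(-1,0), (1,0), (0,-1), (0,1), (-1,-1), (-1,1), (1,-1), (1,1)]

-- all (i, j) of the two nested 'for … in range(N)' loops, flattened
def pvPairs (board : List (List String)) : List (Int × Int) :=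
  (PySem.List.pyRange 0 board.length 1).flatMap
    (fun i => (PySem.List.pyRange 0 board.length 1).map (fun j => (i, j)))

-- ===== PORT A =====
-- the 'while 0 <= ni < N and 0 <= nj < N' walk; fuel N+1 bounds its ≤ N iterations
-- (none = returned -1, some true = enemy found, some false = ray exhausted)
def pvRayA (board : List (List String)) (gang enemy : String) (dx dy : Int) :
    Nat → Int → Int → Option Bool
  | 0, _, _ => some false
  | fuel+1, ni, nj =>
    if 0 ≤ ni ∧ ni < (board.length : Int) ∧ 0 ≤ nj ∧ nj < (board.length : Int) then
      if pvCell board ni nj = gang then none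
      else if pvCell board ni nj = enemy then some true
      else pvRayA board gang enemy dx dy fuel (ni + dx) (nj + dy)
    else some false

-- 'for dx, dy in DIRECTIONS' with the early 'return -1'
def pvCountGo (board : List (List String)) (i j : Int) (gang enemy : String) :
    List (Int × Int) → Int → Int
  | [], acc => acc
  | (dx, dy) :: rest, acc =>
    match pvRayA board gang enemy dx dy (board.length + 1) (i + dx) (j + dy) with
    | none => -1
    | some true => pvCountGo board i j gang enemy rest (acc + 1)
    | some false => pvCountGo board i j gang enemy rest acc

def count_enemies_in_sight (board : List (List String)) (i j : Int) (gang : String) : Int :=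
  pvCountGo board i j gang (if gang = "P" then "B" else "P") pvDIRECTIONS 0

-- the nested i/j loops with the early 'return False'
def pvCheckCells (board : List (List String)) : List (Int × Int) → Bool
  | [] => true
  | (i, j) :: rest =>
    if pvCell board i j = "B" ∨ pvCell board i j = "P" then
      let e := count_enemies_in_sight board i j (pvCell board i j)
      if e = -1 ∨ e < 2 then false
      else pvCheckCells board rest
    else pvCheckCells board rest

def validate_standoff (board : List (List String)) : Bool :=
  pvCheckCells board (pvPairs board)

-- ===== PORT B =====
-- the shooters comprehension
def pvShooters (board : List (List String)) : List (Int × Int × String) :=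
  (pvPairs board).filterMap (fun p =>
    if pvCell board p.1 p.2 = "B" ∨ pvCell board p.1 p.2 = "P" then
      some (p.1, p.2, pvCell board p.1 p.2)
    else none)

-- the inner 'for (x, y, g) in shooters' minimum search
def pvBestGo (i j dx dy : Int) : List (Int × Int × String) → Option (Int × String) → Option (Int × String)
  | [], best => best
  | (x, y, g) :: rest, best =>
    let t := if dx ≠ 0 then (x - i) * dx else (y - j) * dy
    if 0 < t ∧ x - i = t * dx ∧ y - j = t * dy then
      match best with
      | none => pvBestGo i j dx dy rest (some (t, g))
      | some (bt, bg) =>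
        if t < bt then pvBestGo i j dx dy rest (some (t, g))
        else pvBestGo i j dx dy rest (some (bt, bg))
    else pvBestGo i j dx dy rest best

-- 'for (dx, dy) in DIRECTIONS' (none = early 'return False' on a same-gang hit)
def pvDirGo (shooters : List (Int × Int × String)) (i j : Int) (c : String) :
    List (Int × Int) → Int → Option Int
  | [], acc => some acc
  | (dx, dy) :: rest, acc =>
    match pvBestGo i j dx dy shooters none with
    | none => pvDirGo shooters i j c rest acc
    | some (_, g) => if g = c then none else pvDirGo shooters i j c rest (acc + 1)

-- 'for (i, j, c) in shooters'
def pvShootGo : List (Int × Int × String) → List (Int × Int × String) → Bool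
  | [], _ => true
  | (i, j, c) :: rest, s =>
    match pvDirGo s i j c pvDIRECTIONS 0 with
    | none => false
    | some e => if e < 2 then false else pvShootGo rest s

def validate_standoff_alt (board : List (List String)) : Bool :=
  pvShootGo (pvShooters board) (pvShooters board)

-- ===== PRECONDITION & SPEC =====
-- Pre_ excludes ragged boards having a row shorter than len(board): there A raises
-- IndexError, except when an earlier shooter already made it return False (and B raises).
def Pre_validate_standoff (board : List (List String)) : Prop :=
  ∀ row ∈ board, board.length ≤ row.length
instance (board : List (List String)) : Decidable (Pre_validate_standoff board) := by
  unfold Pre_validate_standoff; infer_instance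
def pvWitness_validate_standoff : List (List String) := [["B", "P"], ["P", "B"]]

def Spec_validate_standoff (board : List (List String)) (out : Bool) : Prop :=
  out = validate_standoff_alt board
instance (board : List (List String)) (out : Bool) : Decidable (Spec_validate_standoff board out) := by
  unfold Spec_validate_standoff; infer_instance

-- ===== CLAIM (what is proved, stated in full; the proofs are below) =====
def Claim_equal_validate_standoff : Prop :=
  ∀ (board : List (List String)), Dom_validate_standoff board →
    Pre_validate_standoff board → Spec_validate_standoff board (validate_standoff board)

-- ===== LEMMAS AND PROOFS =====

-- in-bounds / hit predicates for the cell t steps along the ray from (i, j)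
def pvInb (board : List (List String)) (i j dx dy t : Int) : Prop :=
  0 ≤ i + t * dx ∧ i + t * dx < (board.length : Int) ∧
  0 ≤ j + t * dy ∧ j + t * dy < (board.length : Int)

def pvHit (board : List (List String)) (i j dx dy t : Int) : Prop :=
  pvInb board i j dx dy t ∧
  (pvCell board (i + t * dx) (j + t * dy) = "B" ∨ pvCell board (i + t * dx) (j + t * dy) = "P")

lemma mem_pvPairs (board : List (List String)) (p : Int × Int) :
    p ∈ pvPairs board ↔
      0 ≤ p.1 ∧ p.1 < (board.length : Int) ∧ 0 ≤ p.2 ∧ p.2 < (board.length : Int) := by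
  obtain ⟨x, y⟩ := p
  simp only [pvPairs, List.mem_flatMap, List.mem_map, PySem.List.mem_pyRange_one,
    Prod.mk.injEq]
  constructor
  · rintro ⟨a, ⟨ha1, ha2⟩, b, ⟨hb1, hb2⟩, rfl, rfl⟩
    exact ⟨ha1, ha2, hb1, hb2⟩
  · rintro ⟨h1, h2, h3, h4⟩
    exact ⟨x, ⟨h1, h2⟩, y, ⟨h3, h4⟩, rfl, rfl⟩

lemma mem_pvShooters (board : List (List String)) (x y : Int) (g : String) :
    (x, y, g) ∈ pvShooters board ↔
      (0 ≤ x ∧ x < (board.length : Int) ∧ 0 ≤ y ∧ y < (board.length : Int)) ∧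
      (pvCell board x y = "B" ∨ pvCell board x y = "P") ∧ g = pvCell board x y := by
  simp only [pvShooters, List.mem_filterMap]
  constructor
  · rintro ⟨⟨a, b⟩, hp, hc⟩
    rw [mem_pvPairs] at hp
    by_cases h : pvCell board a b = "B" ∨ pvCell board a b = "P"
    · rw [if_pos h] at hc
      injection hc with hc
      simp only [Prod.mk.injEq] at hc
      obtain ⟨rfl, rfl, rfl⟩ := hc
      exact ⟨hp, h, rfl⟩
    · rw [if_neg h] at hc; exact absurd hc (by simp)
  · rintro ⟨hb, hbp, hg⟩
    refine ⟨(x, y), ?_, ?_⟩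
    · rw [mem_pvPairs]; exact hb
    · simp only [if_pos hbp]; rw [hg]

-- the fold step of the minimum search, and the candidate extraction
def pvStep (b : Option (Int × String)) (c : Int × String) : Option (Int × String) :=
  match b with
  | none => some c
  | some (bt, bg) => if c.1 < bt then some c else some (bt, bg)

def pvCand (i j dx dy : Int) (s : Int × Int × String) : Option (Int × String) :=
  let t := if dx ≠ 0 then (s.1 - i) * dx else (s.2.1 - j) * dy
  if 0 < t ∧ s.1 - i = t * dx ∧ s.2.1 - j = t * dy then some (t, s.2.2) else none

lemma bestGo_eq_foldl (i j dx dy : Int) :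
    ∀ (l : List (Int × Int × String)) (best : Option (Int × String)),
      pvBestGo i j dx dy l best = (l.filterMap (pvCand i j dx dy)).foldl pvStep best := by
  intro l
  induction l with
  | nil => intro best; rfl
  | cons s rest ih =>
    intro best
    obtain ⟨x, y, g⟩ := s
    rw [List.filterMap_cons]
    by_cases hc : 0 < (if dx ≠ 0 then (x - i) * dx else (y - j) * dy) ∧
        x - i = (if dx ≠ 0 then (x - i) * dx else (y - j) * dy) * dx ∧
        y - j = (if dx ≠ 0 then (x - i) * dx else (y - j) * dy) * dy
    · have hcand : pvCand i j dx dy (x, y, g) =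
          some ((if dx ≠ 0 then (x - i) * dx else (y - j) * dy), g) := by
        simp only [pvCand, if_pos hc]
      rw [hcand, List.foldl_cons]
      show (if 0 < _ ∧ _ ∧ _ then _ else _) = _
      rw [if_pos hc]
      cases best with
      | none => exact ih _
      | some b =>
        obtain ⟨bt, bg⟩ := b
        show (if (if dx ≠ 0 then (x - i) * dx else (y - j) * dy) < bt then _ else _) = _
        by_cases hlt : (if dx ≠ 0 then (x - i) * dx else (y - j) * dy) < bt
        · rw [if_pos hlt, ih]
          congr 1
          simp only [pvStep]
          rw [if_pos hlt]
        · rw [if_neg hlt, ih]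
          congr 1
          simp only [pvStep]
          rw [if_neg hlt]
    · have hcand : pvCand i j dx dy (x, y, g) = none := by
        simp only [pvCand, if_neg hc]
      rw [hcand]
      show (if 0 < _ ∧ _ ∧ _ then _ else _) = _
      rw [if_neg hc]
      exact ih best

lemma foldl_step_none :
    ∀ (cs : List (Int × String)) (b : Option (Int × String)),
      cs.foldl pvStep b = none → b = none ∧ cs = [] := by
  intro cs
  induction cs with
  | nil => intro b h; exact ⟨h, rfl⟩
  | cons c rest ih =>
    intro b h
    obtain ⟨hb, hrest⟩ := ih (pvStep b c) h
    exfalso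
    cases b with
    | none => simp [pvStep] at hb
    | some p => obtain ⟨bt, bg⟩ := p; simp only [pvStep] at hb; split at hb <;> simp at hb

lemma foldl_step_mem :
    ∀ (cs : List (Int × String)) (b : Option (Int × String)) (t : Int) (g : String),
      cs.foldl pvStep b = some (t, g) → (t, g) ∈ cs ∨ b = some (t, g) := by
  intro cs
  induction cs with
  | nil => intro b t g h; exact Or.inr h
  | cons c rest ih =>
    intro b t g h
    rcases ih (pvStep b c) t g h with hm | hs
    · exact Or.inl (List.mem_cons_of_mem _ hm)
    · cases b with
      | none =>
        simp only [pvStep] at hs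
        injection hs with hs
        exact Or.inl (hs ▸ List.mem_cons_self ..)
      | some p =>
        obtain ⟨bt, bg⟩ := p
        simp only [pvStep] at hs
        split at hs
        · injection hs with hs
          exact Or.inl (hs ▸ List.mem_cons_self ..)
        · exact Or.inr hs

lemma foldl_step_min :
    ∀ (cs : List (Int × String)) (b : Option (Int × String)) (t : Int) (g : String),
      cs.foldl pvStep b = some (t, g) →
      (∀ c ∈ cs, t ≤ c.1) ∧ (∀ bt bg, b = some (bt, bg) → t ≤ bt) := by
  intro cs
  induction cs with
  | nil =>
    intro b t g h
    rw [List.foldl_nil] at h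
    refine ⟨fun c hc => absurd hc (by simp), fun bt bg hb => ?_⟩
    rw [hb] at h
    injection h with h'
    have : bt = t := congrArg Prod.fst h'
    omega
  | cons c rest ih =>
    intro b t g h
    obtain ⟨h1, h2⟩ := ih (pvStep b c) t g h
    have hc1 : t ≤ c.1 ∧ ∀ bt bg, b = some (bt, bg) → t ≤ bt := by
      cases b with
      | none =>
        refine ⟨h2 c.1 c.2 rfl, fun bt bg hb => by simp at hb⟩
      | some p =>
        obtain ⟨bt, bg⟩ := p
        by_cases hlt : c.1 < bt
        · have hs : pvStep (some (bt, bg)) c = some (c.1, c.2) := by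
            simp only [pvStep]; rw [if_pos hlt]
          have := h2 c.1 c.2 hs
          refine ⟨this, fun bt' bg' hb => ?_⟩
          injection hb with hb'
          have : bt = bt' := congrArg Prod.fst hb'
          omega
        · have hs : pvStep (some (bt, bg)) c = some (bt, bg) := by
            simp only [pvStep]; rw [if_neg hlt]
          have htb := h2 bt bg hs
          refine ⟨by omega, fun bt' bg' hb => ?_⟩
          injection hb with hb'
          have : bt = bt' := congrArg Prod.fst hb'
          omega
    exact ⟨fun c' hc' => by rcases List.mem_cons.mp hc' with rfl | hm; exacts [hc1.1, h1 c' hm],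
      hc1.2⟩

lemma pvDirs_ok : ∀ d ∈ pvDIRECTIONS,
    (d.1 = -1 ∨ d.1 = 0 ∨ d.1 = 1) ∧ (d.2 = -1 ∨ d.2 = 0 ∨ d.2 = 1) ∧
    ¬(d.1 = 0 ∧ d.2 = 0) := by decide

lemma pvInb_mono (board : List (List String)) (i j dx dy : Int)
    (hdx : dx = -1 ∨ dx = 0 ∨ dx = 1) (hdy : dy = -1 ∨ dy = 0 ∨ dy = 1)
    (hne : ¬(dx = 0 ∧ dy = 0))
    (hi : 0 ≤ i) (hi' : i < (board.length : Int)) (hj : 0 ≤ j) (hj' : j < (board.length : Int))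
    (k t : Int) (hk : 1 ≤ k) (hkt : k ≤ t) (h : ¬ pvInb board i j dx dy k) :
    ¬ pvInb board i j dx dy t := by
  unfold pvInb at *
  rcases hdx with rfl | rfl | rfl <;> rcases hdy with rfl | rfl | rfl <;> omega

lemma pvHit_bound (board : List (List String)) (i j dx dy : Int)
    (hdx : dx = -1 ∨ dx = 0 ∨ dx = 1) (hdy : dy = -1 ∨ dy = 0 ∨ dy = 1)
    (hne : ¬(dx = 0 ∧ dy = 0))
    (hi : 0 ≤ i) (hi' : i < (board.length : Int)) (hj : 0 ≤ j) (hj' : j < (board.length : Int))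
    (t : Int) (_ht : 1 ≤ t) (h : pvInb board i j dx dy t) : t ≤ (board.length : Int) := by
  unfold pvInb at h
  rcases hdx with rfl | rfl | rfl <;> rcases hdy with rfl | rfl | rfl <;> omega

lemma pvCand_iff (board : List (List String)) (i j dx dy : Int)
    (hdx : dx = -1 ∨ dx = 0 ∨ dx = 1) (hdy : dy = -1 ∨ dy = 0 ∨ dy = 1)
    (hne : ¬(dx = 0 ∧ dy = 0)) (t : Int) (g : String) :
    (t, g) ∈ (pvShooters board).filterMap (pvCand i j dx dy) ↔
      1 ≤ t ∧ pvHit board i j dx dy t ∧ g = pvCell board (i + t * dx) (j + t * dy) := by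
  rw [List.mem_filterMap]
  constructor
  · rintro ⟨⟨x, y, g0⟩, hs, hc⟩
    rw [mem_pvShooters] at hs
    obtain ⟨⟨hx1, hx2, hy1, hy2⟩, hbp, rfl⟩ := hs
    simp only [pvCand] at hc
    by_cases hcond : 0 < (if dx ≠ 0 then (x - i) * dx else (y - j) * dy) ∧
        x - i = (if dx ≠ 0 then (x - i) * dx else (y - j) * dy) * dx ∧
        y - j = (if dx ≠ 0 then (x - i) * dx else (y - j) * dy) * dy
    · rw [if_pos hcond] at hc
      injection hc with hc
      have h1 : (if dx ≠ 0 then (x - i) * dx else (y - j) * dy) = t := congrArg Prod.fst hc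
      have h2 : pvCell board x y = g := congrArg Prod.snd hc
      rw [h1] at hcond
      obtain ⟨hpos, hex, hey⟩ := hcond
      have hx : i + t * dx = x := by omega
      have hy : j + t * dy = y := by omega
      refine ⟨by omega, ⟨by unfold pvInb; omega, ?_⟩, ?_⟩
      · rw [hx, hy]; exact hbp
      · rw [hx, hy]; exact h2.symm
    · rw [if_neg hcond] at hc; exact absurd hc (by simp)
  · rintro ⟨ht, ⟨hinb, hbp⟩, rfl⟩
    refine ⟨(i + t * dx, j + t * dy, pvCell board (i + t * dx) (j + t * dy)), ?_, ?_⟩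
    · rw [mem_pvShooters]
      unfold pvInb at hinb
      exact ⟨⟨hinb.1, hinb.2.1, hinb.2.2.1, hinb.2.2.2⟩, hbp, rfl⟩
    · have ht0 : (if dx ≠ 0 then ((i + t * dx) - i) * dx else ((j + t * dy) - j) * dy) = t := by
        rcases hdx with rfl | rfl | rfl
        · norm_num
        · rcases hdy with rfl | rfl | rfl
          · norm_num
          · exact absurd ⟨rfl, rfl⟩ hne
          · norm_num
        · norm_num
      simp only [pvCand]
      rw [ht0, if_pos ⟨by omega, by ring, by ring⟩]

lemma pvRayA_no_hit (board : List (List String)) (gang enemy : String) (i j dx dy : Int)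
    (hg : gang = "B" ∧ enemy = "P" ∨ gang = "P" ∧ enemy = "B") :
    ∀ (fuel : Nat) (k : Int), 1 ≤ k →
      (∀ t, k ≤ t → ¬ pvHit board i j dx dy t) →
      pvRayA board gang enemy dx dy fuel (i + k * dx) (j + k * dy) = some false := by
  intro fuel
  induction fuel with
  | zero => intro k _ _; rfl
  | succ fuel ih =>
    intro k hk hno
    simp only [pvRayA]
    by_cases hb : 0 ≤ i + k * dx ∧ i + k * dx < (board.length : Int) ∧
        0 ≤ j + k * dy ∧ j + k * dy < (board.length : Int)
    · rw [if_pos hb]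
      have hnbp : ¬(pvCell board (i + k * dx) (j + k * dy) = "B" ∨
          pvCell board (i + k * dx) (j + k * dy) = "P") :=
        fun hbp => hno k le_rfl ⟨hb, hbp⟩
      have hcg : pvCell board (i + k * dx) (j + k * dy) ≠ gang := by
        rcases hg with ⟨rfl, rfl⟩ | ⟨rfl, rfl⟩ <;> tauto
      have hce : pvCell board (i + k * dx) (j + k * dy) ≠ enemy := by
        rcases hg with ⟨rfl, rfl⟩ | ⟨rfl, rfl⟩ <;> tauto
      rw [if_neg hcg, if_neg hce]
      have e1 : i + k * dx + dx = i + (k + 1) * dx := by ring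
      have e2 : j + k * dy + dy = j + (k + 1) * dy := by ring
      rw [e1, e2]
      exact ih (k + 1) (by omega) (fun t htt => hno t (by omega))
    · rw [if_neg hb]

lemma pvRayA_first_hit (board : List (List String)) (gang enemy : String) (i j dx dy : Int)
    (hdx : dx = -1 ∨ dx = 0 ∨ dx = 1) (hdy : dy = -1 ∨ dy = 0 ∨ dy = 1)
    (hne : ¬(dx = 0 ∧ dy = 0))
    (hi : 0 ≤ i) (hi' : i < (board.length : Int)) (hj : 0 ≤ j) (hj' : j < (board.length : Int))
    (hg : gang = "B" ∧ enemy = "P" ∨ gang = "P" ∧ enemy = "B") :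
    ∀ (fuel : Nat) (k t0 : Int), 1 ≤ k → k ≤ t0 →
      (board.length : Int) + 2 ≤ (fuel : Int) + k →
      pvHit board i j dx dy t0 →
      (∀ t, k ≤ t → t < t0 → ¬ pvHit board i j dx dy t) →
      pvRayA board gang enemy dx dy fuel (i + k * dx) (j + k * dy) =
        (if pvCell board (i + t0 * dx) (j + t0 * dy) = gang then none else some true) := by
  intro fuel
  induction fuel with
  | zero =>
    intro k t0 hk hkt hfuel hhit hmin
    exfalso
    have hb := pvHit_bound board i j dx dy hdx hdy hne hi hi' hj hj' t0 (by omega) hhit.1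
    simp only [Nat.cast_zero] at hfuel
    omega
  | succ fuel ih =>
    intro k t0 hk hkt hfuel hhit hmin
    simp only [pvRayA]
    rcases eq_or_lt_of_le hkt with rfl | hlt
    · have hb : 0 ≤ i + k * dx ∧ i + k * dx < (board.length : Int) ∧
          0 ≤ j + k * dy ∧ j + k * dy < (board.length : Int) := hhit.1
      rw [if_pos hb]
      by_cases hcg : pvCell board (i + k * dx) (j + k * dy) = gang
      · rw [if_pos hcg, if_pos hcg]
      · rw [if_neg hcg, if_neg hcg]
        have hce : pvCell board (i + k * dx) (j + k * dy) = enemy := by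
          rcases hhit.2 with h | h <;> rcases hg with ⟨rfl, rfl⟩ | ⟨rfl, rfl⟩ <;> tauto
        rw [if_pos hce]
    · have hbk : 0 ≤ i + k * dx ∧ i + k * dx < (board.length : Int) ∧
          0 ≤ j + k * dy ∧ j + k * dy < (board.length : Int) := by
        by_contra hnb
        exact (pvInb_mono board i j dx dy hdx hdy hne hi hi' hj hj' k t0 hk hkt hnb) hhit.1
      rw [if_pos hbk]
      have hnbp : ¬(pvCell board (i + k * dx) (j + k * dy) = "B" ∨
          pvCell board (i + k * dx) (j + k * dy) = "P") :=
        fun hbp => hmin k le_rfl hlt ⟨hbk, hbp⟩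
      have hcg : pvCell board (i + k * dx) (j + k * dy) ≠ gang := by
        rcases hg with ⟨rfl, rfl⟩ | ⟨rfl, rfl⟩ <;> tauto
      have hce : pvCell board (i + k * dx) (j + k * dy) ≠ enemy := by
        rcases hg with ⟨rfl, rfl⟩ | ⟨rfl, rfl⟩ <;> tauto
      rw [if_neg hcg, if_neg hce]
      have e1 : i + k * dx + dx = i + (k + 1) * dx := by ring
      have e2 : j + k * dy + dy = j + (k + 1) * dy := by ring
      rw [e1, e2]
      refine ih (k + 1) t0 (by omega) (by omega) ?_ hhit (fun t h1 h2 => hmin t (by omega) h2)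
      push_cast at hfuel ⊢
      omega

lemma pvRay_vs_best (board : List (List String)) (gang enemy : String) (i j dx dy : Int)
    (hdx : dx = -1 ∨ dx = 0 ∨ dx = 1) (hdy : dy = -1 ∨ dy = 0 ∨ dy = 1)
    (hne : ¬(dx = 0 ∧ dy = 0))
    (hi : 0 ≤ i) (hi' : i < (board.length : Int)) (hj : 0 ≤ j) (hj' : j < (board.length : Int))
    (hg : gang = "B" ∧ enemy = "P" ∨ gang = "P" ∧ enemy = "B") :
    pvRayA board gang enemy dx dy (board.length + 1) (i + dx) (j + dy) =
      (match pvBestGo i j dx dy (pvShooters board) none with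
       | none => some false
       | some (_, g) => if g = gang then none else some true) := by
  rw [bestGo_eq_foldl]
  have epos1 : i + dx = i + 1 * dx := by ring
  have epos2 : j + dy = j + 1 * dy := by ring
  by_cases hex : ∃ t : Int, 1 ≤ t ∧ pvHit board i j dx dy t
  · haveI : DecidablePred (fun z : Int => 1 ≤ z ∧ pvHit board i j dx dy z) := fun z => by
      unfold pvHit pvInb; infer_instance
    obtain ⟨t0, ⟨ht01, ht0hit⟩, ht0min⟩ :=
      Int.exists_least_of_bdd (P := fun z : Int => 1 ≤ z ∧ pvHit board i j dx dy z)
        ⟨1, fun z hz => hz.1⟩ hex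
    have hL : pvRayA board gang enemy dx dy (board.length + 1) (i + 1 * dx) (j + 1 * dy) =
        (if pvCell board (i + t0 * dx) (j + t0 * dy) = gang then none else some true) :=
      pvRayA_first_hit board gang enemy i j dx dy hdx hdy hne hi hi' hj hj' hg
        (board.length + 1) 1 t0 le_rfl ht01 (by push_cast; omega) ht0hit
        (fun t h1 h2 hh => absurd (ht0min t ⟨h1, hh⟩) (by omega))
    have ht0mem : (t0, pvCell board (i + t0 * dx) (j + t0 * dy)) ∈
        (pvShooters board).filterMap (pvCand i j dx dy) := by
      rw [pvCand_iff board i j dx dy hdx hdy hne]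
      exact ⟨ht01, ht0hit, rfl⟩
    cases hres : ((pvShooters board).filterMap (pvCand i j dx dy)).foldl pvStep none with
    | none =>
      exfalso
      obtain ⟨-, hnil⟩ := foldl_step_none _ _ hres
      rw [hnil] at ht0mem
      exact absurd ht0mem (by simp)
    | some p =>
      obtain ⟨tm, gm⟩ := p
      have hmem : (tm, gm) ∈ (pvShooters board).filterMap (pvCand i j dx dy) := by
        rcases foldl_step_mem _ _ _ _ hres with h | h
        · exact h
        · exact absurd h (by simp)
      rw [pvCand_iff board i j dx dy hdx hdy hne] at hmem
      obtain ⟨htm1, htmhit, rfl⟩ := hmem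
      have hle1 : t0 ≤ tm := ht0min tm ⟨htm1, htmhit⟩
      have hle2 : tm ≤ t0 := by
        have := (foldl_step_min _ _ _ _ hres).1 _ ht0mem
        simpa using this
      have : tm = t0 := by omega
      subst this
      rw [epos1, epos2, hL]
  · simp only [not_exists, not_and] at hex
    have hL : pvRayA board gang enemy dx dy (board.length + 1) (i + 1 * dx) (j + 1 * dy) =
        some false :=
      pvRayA_no_hit board gang enemy i j dx dy hg (board.length + 1) 1 le_rfl
        (fun t htt hh => hex t htt hh)
    cases hres : ((pvShooters board).filterMap (pvCand i j dx dy)).foldl pvStep none with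
    | none => rw [epos1, epos2, hL]
    | some p =>
      exfalso
      obtain ⟨tm, gm⟩ := p
      have hmem : (tm, gm) ∈ (pvShooters board).filterMap (pvCand i j dx dy) := by
        rcases foldl_step_mem _ _ _ _ hres with h | h
        · exact h
        · exact absurd h (by simp)
      rw [pvCand_iff board i j dx dy hdx hdy hne] at hmem
      exact hex tm hmem.1 hmem.2.1

lemma pvCountGo_eq_dirGo (board : List (List String)) (i j : Int) (gang enemy : String)
    (hi : 0 ≤ i) (hi' : i < (board.length : Int)) (hj : 0 ≤ j) (hj' : j < (board.length : Int))
    (hg : gang = "B" ∧ enemy = "P" ∨ gang = "P" ∧ enemy = "B") :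
    ∀ (dirs : List (Int × Int)), (∀ d ∈ dirs, d ∈ pvDIRECTIONS) → ∀ acc : Int,
      pvCountGo board i j gang enemy dirs acc =
        (match pvDirGo (pvShooters board) i j gang dirs acc with
         | none => -1
         | some e => e) := by
  intro dirs
  induction dirs with
  | nil => intro _ acc; rfl
  | cons d rest ih =>
    intro hd acc
    obtain ⟨dx, dy⟩ := d
    obtain ⟨hdx, hdy, hne⟩ := pvDirs_ok _ (hd _ (List.mem_cons_self ..))
    simp only [pvCountGo, pvDirGo]
    rw [pvRay_vs_best board gang enemy i j dx dy hdx hdy hne hi hi' hj hj' hg]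
    cases hb : pvBestGo i j dx dy (pvShooters board) none with
    | none => exact ih (fun d hm => hd d (List.mem_cons_of_mem _ hm)) acc
    | some p =>
      obtain ⟨t, g⟩ := p
      show (match (if g = gang then (none : Option Bool) else some true) with
            | none => (-1 : Int)
            | some true => pvCountGo board i j gang enemy rest (acc + 1)
            | some false => pvCountGo board i j gang enemy rest acc) =
          (match (if g = gang then (none : Option Int)
                  else pvDirGo (pvShooters board) i j gang rest (acc + 1)) with
            | none => (-1 : Int)
            | some e => e)
      by_cases hgg : g = gang
      · rw [if_pos hgg, if_pos hgg]
      · rw [if_neg hgg, if_neg hgg]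
        exact ih (fun d hm => hd d (List.mem_cons_of_mem _ hm)) (acc + 1)

lemma pvDirGo_ge (s : List (Int × Int × String)) (i j : Int) (c : String) :
    ∀ (dirs : List (Int × Int)) (acc e : Int),
      pvDirGo s i j c dirs acc = some e → acc ≤ e := by
  intro dirs
  induction dirs with
  | nil =>
    intro acc e h
    injection h with h
    omega
  | cons d rest ih =>
    intro acc e h
    obtain ⟨dx, dy⟩ := d
    simp only [pvDirGo] at h
    cases hb : pvBestGo i j dx dy s none with
    | none => rw [hb] at h; exact ih acc e h
    | some p =>
      obtain ⟨t, g⟩ := p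
      rw [hb] at h
      have h' : (if g = c then (none : Option Int)
          else pvDirGo s i j c rest (acc + 1)) = some e := h
      by_cases hgg : g = c
      · rw [if_pos hgg] at h'; exact absurd h' (by simp)
      · rw [if_neg hgg] at h'
        have := ih (acc + 1) e h'
        omega

lemma pvCheck_eq_shoot (board : List (List String)) :
    ∀ (l : List (Int × Int)),
      (∀ p ∈ l, 0 ≤ p.1 ∧ p.1 < (board.length : Int) ∧ 0 ≤ p.2 ∧ p.2 < (board.length : Int)) →
      pvCheckCells board l =
        pvShootGo
          (l.filterMap (fun p =>
            if pvCell board p.1 p.2 = "B" ∨ pvCell board p.1 p.2 = "P" then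
              some (p.1, p.2, pvCell board p.1 p.2)
            else none))
          (pvShooters board) := by
  intro l
  induction l with
  | nil => intro _; rfl
  | cons p rest ih =>
    intro hb
    obtain ⟨i, j⟩ := p
    obtain ⟨hi, hi', hj, hj'⟩ := hb (i, j) (List.mem_cons_self ..)
    have ihr := ih (fun q hq => hb q (List.mem_cons_of_mem _ hq))
    simp only [pvCheckCells, List.filterMap_cons]
    by_cases hbp : pvCell board i j = "B" ∨ pvCell board i j = "P"
    · rw [if_pos hbp, if_pos hbp]
      have hg : pvCell board i j = "B" ∧ (if pvCell board i j = "P" then "B" else "P") = "P" ∨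
          pvCell board i j = "P" ∧ (if pvCell board i j = "P" then "B" else "P") = "B" := by
        rcases hbp with hc | hc
        · left; exact ⟨hc, by rw [hc]; decide⟩
        · right; exact ⟨hc, by rw [hc]; decide⟩
      have hcount := pvCountGo_eq_dirGo board i j (pvCell board i j)
        (if pvCell board i j = "P" then "B" else "P") hi hi' hj hj' hg
        pvDIRECTIONS (fun d hd => hd) 0
      show (if count_enemies_in_sight board i j (pvCell board i j) = -1 ∨
            count_enemies_in_sight board i j (pvCell board i j) < 2 then false
          else pvCheckCells board rest) = _
      unfold count_enemies_in_sight
      rw [hcount]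
      have hred : pvShootGo ((i, j, pvCell board i j) ::
            rest.filterMap (fun p =>
              if pvCell board p.1 p.2 = "B" ∨ pvCell board p.1 p.2 = "P" then
                some (p.1, p.2, pvCell board p.1 p.2)
              else none)) (pvShooters board) =
          (match pvDirGo (pvShooters board) i j (pvCell board i j) pvDIRECTIONS 0 with
           | none => false
           | some e => if e < 2 then false
              else pvShootGo (rest.filterMap (fun p =>
                if pvCell board p.1 p.2 = "B" ∨ pvCell board p.1 p.2 = "P" then
                  some (p.1, p.2, pvCell board p.1 p.2)
                else none)) (pvShooters board)) := rfl
      rw [show (pvShootGo (match some (i, j, pvCell board i j) with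
            | none => rest.filterMap (fun p =>
                if pvCell board p.1 p.2 = "B" ∨ pvCell board p.1 p.2 = "P" then
                  some (p.1, p.2, pvCell board p.1 p.2)
                else none)
            | some b => b :: rest.filterMap (fun p =>
                if pvCell board p.1 p.2 = "B" ∨ pvCell board p.1 p.2 = "P" then
                  some (p.1, p.2, pvCell board p.1 p.2)
                else none)) (pvShooters board)) =
          pvShootGo ((i, j, pvCell board i j) ::
            rest.filterMap (fun p =>
              if pvCell board p.1 p.2 = "B" ∨ pvCell board p.1 p.2 = "P" then
                some (p.1, p.2, pvCell board p.1 p.2)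
              else none)) (pvShooters board) from rfl, hred]
      cases hdg : pvDirGo (pvShooters board) i j (pvCell board i j) pvDIRECTIONS 0 with
      | none =>
        rw [if_pos (Or.inl rfl)]
      | some e =>
        have he0 : 0 ≤ e := pvDirGo_ge _ _ _ _ _ _ _ hdg
        show (if (e : Int) = -1 ∨ e < 2 then false else pvCheckCells board rest) =
          (if e < 2 then false
           else pvShootGo (rest.filterMap (fun p =>
              if pvCell board p.1 p.2 = "B" ∨ pvCell board p.1 p.2 = "P" then
                some (p.1, p.2, pvCell board p.1 p.2)
              else none)) (pvShooters board))
        by_cases he : e < 2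
        · rw [if_pos (Or.inr he), if_pos he]
        · rw [if_neg (by omega : ¬((e : Int) = -1 ∨ e < 2)), if_neg he]
          exact ihr
    · rw [if_neg hbp, if_neg hbp]
      exact ihr

-- ===== VERDICT (by name: the statement is the Claim_ definition above) =====
theorem validate_standoff_spec : Claim_equal_validate_standoff := by
  intro board _ _
  unfold Spec_validate_standoff validate_standoff validate_standoff_alt
  rw [pvCheck_eq_shoot board (pvPairs board) (fun p hp => (mem_pvPairs board p).mp hp)]
  rfl
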